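-- pv_equiv track=rewrite | github.com/chenxu0602/LeetCode | 1765.map-of-highest-peak.py | highestPeak
-- ===== SOURCE A (Python) =====
-- from typing import List
--
-- from collections import deque
--
-- def highestPeak(isWater: List[List[int]]) -> List[List[int]]:
--     # O(M x N)
--     m, n = map(len, (isWater, isWater[0]))
--     height = [[-1] * n for _ in range(m)]
--     bfs = deque([])
--     for r in range(m):
--         for c in range(n):
--             if isWater[r][c] == 1:
--                 bfs.append((r, c))
--                 height[r][c] = 0
--
--     while bfs:
--         r, c = bfs.popleft()
--         for dr, dc in (1, 0), (-1, 0), (0, 1), (0, -1):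
--             nr, nc = r + dr, c + dc
--             if 0 <= nr < m and 0 <= nc < n and height[nr][nc] == -1:
--                 height[nr][nc] = height[r][c] + 1
--                 bfs.append((nr, nc))
--
--     return height
-- ===== SOURCE B (Python) =====
-- from typing import List
--
--
-- def highestPeak(isWater: List[List[int]]) -> List[List[int]]:
--     # Since the grid has no obstacles, the BFS distance from the nearest water
--     # cell is exactly the minimum Manhattan distance to any water cell.
--     m, n = len(isWater), len(isWater[0])
--     waters = [(r, c) for r in range(m) for c in range(n) if isWater[r][c] == 1]
--     if not waters:
--         return [[-1] * n for _ in range(m)]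
--     return [[min(abs(r - wr) + abs(c - wc) for wr, wc in waters)
--              for c in range(n)] for r in range(m)]
-- ===== Notes on version B (the rewrite author's own statement) =====
-- stated objective: alternative
-- what changed: Replaces the multi-source BFS with queue and in-place grid mutation by a direct closed-form computation: collect the water cells once, then each cell's height is the minimum Manhattan distance to a water cell (equal to the BFS distance because the grid is unobstructed), with an all -1 grid when there is no water.
import Mathlib
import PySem

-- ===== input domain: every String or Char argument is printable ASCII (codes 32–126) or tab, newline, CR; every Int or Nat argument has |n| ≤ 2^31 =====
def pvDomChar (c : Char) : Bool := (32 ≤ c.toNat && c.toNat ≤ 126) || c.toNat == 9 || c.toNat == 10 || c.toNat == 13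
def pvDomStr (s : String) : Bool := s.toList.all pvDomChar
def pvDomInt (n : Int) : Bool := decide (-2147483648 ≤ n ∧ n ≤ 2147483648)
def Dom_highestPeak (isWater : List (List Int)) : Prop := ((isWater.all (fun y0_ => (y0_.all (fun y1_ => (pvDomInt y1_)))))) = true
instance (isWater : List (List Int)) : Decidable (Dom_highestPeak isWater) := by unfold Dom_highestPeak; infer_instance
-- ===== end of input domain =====

-- B replaces A's multi-source BFS by the closed-form minimum Manhattan distance to a water cell
-- (the same value, since the grid is unobstructed); equivalence is about the return value only.

-- ===== PORT A =====
-- subscript helpers, used by both ports only after the Python-side bounds are established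
def pvGet (g : List (List Int)) (r c : Int) : Int := (g.getD r.toNat []).getD c.toNat 0
def pvSet (g : List (List Int)) (r c : Int) (v : Int) : List (List Int) :=
  g.modify r.toNat (fun row => row.set c.toNat v)

-- the direction tuple '(1, 0), (-1, 0), (0, 1), (0, -1)' of A
def pvDirs : List (Int × Int) := [(1, 0), (-1, 0), (0, 1), (0, -1)]

-- the body of the 'for dr, dc in …' loop of A's while-loop
def pvRelax (m n r c : Int) (st : List (List Int) × List (Int × Int)) (d : Int × Int) :
    List (List Int) × List (Int × Int) :=
  let nr := r + d.1
  let nc := c + d.2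
  if 0 ≤ nr ∧ nr < m ∧ 0 ≤ nc ∧ nc < n ∧ pvGet st.1 nr nc = -1 then
    (pvSet st.1 nr nc (pvGet st.1 r c + 1), st.2 ++ [(nr, nc)])
  else st

def pvStep (m n : Int) (h : List (List Int)) (r c : Int) : List (List Int) × List (Int × Int) :=
  pvDirs.foldl (pvRelax m n r c) (h, [])

-- A's 'while bfs' loop; the fuel m*n + |queue| is an upper bound on (#cells still -1) + |queue|,
-- which decreases at every iteration, so the loop always terminates before the fuel runs out
def pvBfs (m n : Int) : Nat → List (List Int) → List (Int × Int) → List (List Int)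
  | 0, h, _ => h
  | fuel+1, h, q =>
    match q with
    | [] => h
    | (r, c) :: rest =>
      let st := pvStep m n h r c
      pvBfs m n fuel st.1 (rest ++ st.2)

def highestPeak (isWater : List (List Int)) : List (List Int) :=
  let m : Int := isWater.length
  let n : Int := (isWater.headI).length   -- isWater[0]: Pre_ excludes isWater = [] (IndexError)
  let height0 := List.replicate m.toNat (List.replicate n.toNat (-1 : Int))
  let init := (PySem.List.pyRange 0 m 1).foldl (fun st r =>
      (PySem.List.pyRange 0 n 1).foldl (fun (st : List (Int × Int) × List (List Int)) c =>
        if pvGet isWater r c = 1 then (st.1 ++ [(r, c)], pvSet st.2 r c 0) else st) st)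
    ([], height0)
  pvBfs m n (m.toNat * n.toNat + init.1.length) init.2 init.1

-- ===== PORT B =====
def highestPeak_alt (isWater : List (List Int)) : List (List Int) :=
  let m : Int := isWater.length
  let n : Int := (isWater.headI).length   -- isWater[0]: Pre_ excludes isWater = [] (IndexError)
  let waters := (PySem.List.pyRange 0 m 1).flatMap (fun r =>
    ((PySem.List.pyRange 0 n 1).filter (fun c => pvGet isWater r c == 1)).map (fun c => (r, c)))
  if waters = [] then
    (PySem.List.pyRange 0 m 1).map (fun _ => List.replicate n.toNat (-1 : Int))
  else
    (PySem.List.pyRange 0 m 1).map (fun r =>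
      (PySem.List.pyRange 0 n 1).map (fun c =>
        -- Python min over a nonempty list (waters ≠ [] on this branch, so the default is never used)
        (PySem.List.min? (waters.map (fun w => |r - w.1| + |c - w.2|)) (fun x => x)).getD 0))

-- ===== PRECONDITION & SPEC =====
-- Pre_ excludes exactly the inputs where A raises IndexError: the empty grid (isWater[0]) and
-- grids with a row shorter than row 0 (isWater[r][c] with c < len(isWater[0])).
def Pre_highestPeak (isWater : List (List Int)) : Prop :=
  isWater ≠ [] ∧ ∀ row ∈ isWater, (isWater.headI).length ≤ row.length
instance (isWater : List (List Int)) : Decidable (Pre_highestPeak isWater) := by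
  unfold Pre_highestPeak; infer_instance
def pvWitness_highestPeak : List (List Int) := [[1, 0], [0, 0]]
def Spec_highestPeak (isWater : List (List Int)) (out : List (List Int)) : Prop := out = highestPeak_alt isWater
instance (isWater : List (List Int)) (out : List (List Int)) : Decidable (Spec_highestPeak isWater out) := by unfold Spec_highestPeak; infer_instance

-- ===== CLAIM (what is proved, stated in full; the proofs are below) =====
def Claim_equal_highestPeak : Prop := ∀ (isWater : List (List Int)), Dom_highestPeak isWater → Pre_highestPeak isWater → Spec_highestPeak isWater (highestPeak isWater)

-- ===== LEMMAS AND PROOFS =====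

/-- In-grid predicate for a cell. -/
def pvInG (m n : Int) (p : Int × Int) : Prop := 0 ≤ p.1 ∧ p.1 < m ∧ 0 ≤ p.2 ∧ p.2 < n

/-- The grid has m rows, each of length n. -/
def pvDims (h : List (List Int)) (m n : Int) : Prop :=
  (h.length : Int) = m ∧ ∀ row ∈ h, (row.length : Int) = n

/-- Manhattan distance. -/
def pvMd (p w : Int × Int) : Int := |p.1 - w.1| + |p.2 - w.2|

/-- Minimum Manhattan distance to a cell of ws (0 if ws = [], unused there). -/
def pvD (ws : List (Int × Int)) (p : Int × Int) : Int :=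
  (PySem.List.min? (ws.map (fun w => pvMd p w)) (fun x => x)).getD 0

/-- 4-adjacency. -/
def pvAdj (p u : Int × Int) : Prop := ∃ d ∈ pvDirs, u = (p.1 + d.1, p.2 + d.2)

/-- Number of cells still equal to -1. -/
def pvCN (h : List (List Int)) : ℕ := (h.map (fun row => row.count (-1))).sum

/-- The row-major list of water cells (as built by both ports). -/
def pvWs (W : List (List Int)) (m n : Int) : List (Int × Int) :=
  (PySem.List.pyRange 0 m 1).flatMap (fun r =>
    ((PySem.List.pyRange 0 n 1).filter (fun c => pvGet W r c == 1)).map (fun c => (r, c)))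

lemma pvWs_mem (W : List (List Int)) (m n : Int) (u : Int × Int) :
    u ∈ pvWs W m n ↔ pvInG m n u ∧ pvGet W u.1 u.2 = 1 := by
  unfold pvWs pvInG
  simp only [List.mem_flatMap, List.mem_map, List.mem_filter, PySem.List.mem_pyRange_one,
    beq_iff_eq]
  constructor
  · rintro ⟨r, hr, c, ⟨hc, hw⟩, rfl⟩
    exact ⟨⟨hr.1, hr.2, hc.1, hc.2⟩, hw⟩
  · rintro ⟨⟨h1, h2, h3, h4⟩, hw⟩
    exact ⟨u.1, ⟨h1, h2⟩, u.2, ⟨⟨h3, h4⟩, hw⟩, rfl⟩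

lemma pvInG_mk (m n a b : Int) : pvInG m n (a, b) ↔ (0 ≤ a ∧ a < m ∧ 0 ≤ b ∧ b < n) :=
  Iff.rfl

-- ---------- grid access lemmas ----------

lemma pvGet_def (g : List (List Int)) (r c : Int) :
    pvGet g r c = ((g[r.toNat]?.getD [])[c.toNat]?.getD 0) := by
  simp [pvGet, List.getD_eq_getElem?_getD]

lemma pvSet_get? (h : List (List Int)) (r c : Int) (v : Int) (k : ℕ) :
    (pvSet h r c v)[k]? = (fun row => if r.toNat = k then row.set c.toNat v else row) <$> h[k]? := by
  rw [pvSet, List.getElem?_modify]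

lemma pvGet_elem (h : List (List Int)) (i j : ℕ) (hi : i < h.length) (hj : j < h[i].length) :
    pvGet h (i : Int) (j : Int) = h[i][j] := by
  simp [pvGet, List.getD_eq_getElem?_getD, List.getElem?_eq_getElem, hi, hj]

lemma pvSet_dims {h : List (List Int)} {m n : Int} (hd : pvDims h m n) (r c v : Int) :
    pvDims (pvSet h r c v) m n := by
  obtain ⟨hl, hr⟩ := hd
  constructor
  · simpa [pvSet] using hl
  · intro row hrow
    rw [List.mem_iff_getElem] at hrow
    obtain ⟨k, hk, rfl⟩ := hrow
    have hk' : k < h.length := by simpa [pvSet] using hk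
    have h1 : (pvSet h r c v)[k]? = some (pvSet h r c v)[k] := List.getElem?_eq_getElem hk
    rw [pvSet_get?, List.getElem?_eq_getElem hk'] at h1
    by_cases hrk : r.toNat = k
    · simp [hrk] at h1
      rw [← h1]
      simpa using hr _ (List.getElem_mem hk')
    · simp [hrk] at h1
      rw [← h1]
      exact hr _ (List.getElem_mem hk')

lemma pvGet_pvSet_self {h : List (List Int)} {m n : Int} (hd : pvDims h m n) {r c : Int} (v : Int)
    (hin : pvInG m n (r, c)) : pvGet (pvSet h r c v) r c = v := by
  rw [pvInG_mk] at hin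
  obtain ⟨h1, h2, h3, h4⟩ := hin
  obtain ⟨hdl, hdr⟩ := hd
  have hrl : r.toNat < h.length := by omega
  have hcl : c.toNat < (h[r.toNat]).length := by
    have := hdr _ (List.getElem_mem hrl); omega
  rw [pvGet_def, pvSet_get?, List.getElem?_eq_getElem hrl]
  simp [List.getElem?_set, hcl]

lemma pvGet_pvSet_ne {h : List (List Int)} {m n : Int} (hd : pvDims h m n) {r c r' c' : Int} (v : Int)
    (hin : pvInG m n (r, c)) (h1' : 0 ≤ r') (h3' : 0 ≤ c') (hne : (r', c') ≠ (r, c)) :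
    pvGet (pvSet h r c v) r' c' = pvGet h r' c' := by
  rw [pvInG_mk] at hin
  obtain ⟨h1, h2, h3, h4⟩ := hin
  rw [pvGet_def, pvGet_def, pvSet_get?]
  by_cases hrk : r.toNat = r'.toNat
  · have hrr : r = r' := by omega
    have hcc : c.toNat ≠ c'.toNat := by
      have hccc : c ≠ c' := by
        rintro rfl
        exact hne (by rw [hrr])
      omega
    cases hrow : h[r'.toNat]? with
    | none => simp [hrk, hrow]
    | some row =>
      simp [hrk, hrow, List.getElem?_set, hcc]
  · cases hrow : h[r'.toNat]? <;> simp [hrk, hrow]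

lemma pvGet_height0 (m n : Int) (u : Int × Int) (hu : pvInG m n u) :
    pvGet (List.replicate m.toNat (List.replicate n.toNat (-1 : Int))) u.1 u.2 = -1 := by
  obtain ⟨h1, h2, h3, h4⟩ := hu
  rw [pvGet_def, List.getElem?_replicate, if_pos (by omega : u.1.toNat < m.toNat)]
  simp only [Option.getD_some]
  rw [List.getElem?_replicate, if_pos (by omega : u.2.toNat < n.toNat)]
  rfl

lemma pvDims_height0 (m n : Int) (hm : 0 ≤ m) (hn : 0 ≤ n) :
    pvDims (List.replicate m.toNat (List.replicate n.toNat (-1 : Int))) m n := by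
  constructor
  · simp; omega
  · intro row hrow
    rw [List.eq_of_mem_replicate hrow]
    simp; omega

lemma pvCN_pvSet {h : List (List Int)} {m n : Int} (hd : pvDims h m n) {r c v : Int}
    (hin : pvInG m n (r, c)) (hv : v ≠ -1) (hold : pvGet h r c = -1) :
    pvCN (pvSet h r c v) + 1 = pvCN h := by
  have hin' := hin
  rw [pvInG_mk] at hin'
  obtain ⟨h1, h2, h3, h4⟩ := hin'
  have hrl : r.toNat < h.length := by
    have := hd.1; omega
  have hcl : c.toNat < (h[r.toNat]).length := by
    have := hd.2 _ (List.getElem_mem hrl); omega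
  have hcell : h[r.toNat][c.toNat] = -1 := by
    have he := pvGet_elem h r.toNat c.toNat hrl hcl
    rw [Int.toNat_of_nonneg h1, Int.toNat_of_nonneg h3] at he
    rw [hold] at he; exact he.symm
  have hms : pvSet h r c v = h.set r.toNat ((h[r.toNat]).set c.toNat v) := by
    rw [pvSet, List.modify_eq_set, List.getElem?_eq_getElem hrl]
    rfl
  rw [hms]
  unfold pvCN
  rw [List.map_set, List.sum_set, if_pos (by simpa using hrl)]
  have hcount : ((h[r.toNat]).set c.toNat v).count (-1) + 1 = (h[r.toNat]).count (-1) := by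
    rw [List.count_set hcl]
    have hpos : 0 < (h[r.toNat]).count (-1) :=
      List.count_pos_iff.mpr (hcell ▸ List.getElem_mem hcl)
    simp [hcell, hv]
    omega
  have hlen : r.toNat < (h.map (fun row => row.count (-1 : Int))).length := by simpa using hrl
  have e1 := List.sum_take_add_sum_drop (h.map (fun row => row.count (-1 : Int))) r.toNat
  have e2 := List.drop_eq_getElem_cons hlen
  have e3 : (h.map (fun row => row.count (-1 : Int)))[r.toNat] = (h[r.toNat]).count (-1) :=
    List.getElem_map _
  have e4 := List.sum_take_add_sum_drop (h.map (fun row => row.count (-1 : Int))) (r.toNat + 1)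
  rw [e2] at e1
  simp only [List.sum_cons] at e1
  -- also relate take (r+1) to take r + elem: not needed; e1 suffices
  omega

lemma pvCN_le {h : List (List Int)} {m n : Int} (hd : pvDims h m n) :
    pvCN h ≤ m.toNat * n.toNat := by
  unfold pvCN
  have h1 : (h.map (fun row => row.count (-1 : Int))).sum ≤ (h.map (fun _ => n.toNat)).sum := by
    apply List.sum_le_sum
    intro row hrow
    have := hd.2 _ hrow
    calc row.count (-1) ≤ row.length := List.count_le_length
    _ = n.toNat := by omega
  have h2 : (h.map (fun _ => n.toNat)).sum = h.length * n.toNat := by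
    rw [List.map_const', List.sum_replicate, smul_eq_mul]
  have h3 : h.length = m.toNat := by have := hd.1; omega
  rw [h3] at h2
  omega

-- ---------- Manhattan distance lemmas ----------

lemma pvMd_nonneg (p w : Int × Int) : 0 ≤ pvMd p w := by
  unfold pvMd; positivity

lemma pvMd_self (p : Int × Int) : pvMd p p = 0 := by simp [pvMd]

lemma pvMd_eq_zero {p w : Int × Int} (h : pvMd p w = 0) : p = w := by
  unfold pvMd at h
  have a1 := abs_nonneg (p.1 - w.1)
  have a2 := abs_nonneg (p.2 - w.2)
  have e1 : |p.1 - w.1| = 0 := by omega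
  have e2 : |p.2 - w.2| = 0 := by omega
  rw [abs_eq_zero, sub_eq_zero] at e1 e2
  exact Prod.ext e1 e2

lemma pvMd_triangle (p q w : Int × Int) : pvMd p w ≤ pvMd p q + pvMd q w := by
  unfold pvMd
  have h1 := abs_sub_le p.1 q.1 w.1
  have h2 := abs_sub_le p.2 q.2 w.2
  linarith

lemma pvMd_comm (p q : Int × Int) : pvMd p q = pvMd q p := by
  unfold pvMd
  rw [abs_sub_comm, abs_sub_comm p.2]

lemma pvD_spec (ws : List (Int × Int)) (p : Int × Int) (hws : ws ≠ []) :
    (∃ w ∈ ws, pvD ws p = pvMd p w) ∧ ∀ w ∈ ws, pvD ws p ≤ pvMd p w := by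
  unfold pvD
  cases hmin : PySem.List.min? (ws.map fun w => pvMd p w) (fun x => x) with
  | none =>
    rw [PySem.List.min?_eq_none_iff] at hmin
    simp at hmin
    exact absurd hmin hws
  | some v =>
    have hmem := PySem.List.min?_mem hmin
    have hismin := PySem.List.min?_isMin hmin
    rw [List.mem_map] at hmem
    obtain ⟨w, hw, hv⟩ := hmem
    constructor
    · exact ⟨w, hw, by simp [← hv]⟩
    · intro w' hw'
      simpa using hismin _ (List.mem_map_of_mem hw')

lemma pvD_nonneg {ws : List (Int × Int)} (hws : ws ≠ []) (p : Int × Int) : 0 ≤ pvD ws p := by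
  obtain ⟨⟨w, hw, he⟩, _⟩ := pvD_spec ws p hws
  rw [he]; exact pvMd_nonneg p w

lemma pvD_lip {ws : List (Int × Int)} (hws : ws ≠ []) (p q : Int × Int) :
    pvD ws p ≤ pvD ws q + pvMd p q := by
  obtain ⟨⟨w, hw, he⟩, _⟩ := pvD_spec ws q hws
  have h1 := (pvD_spec ws p hws).2 w hw
  have h2 := pvMd_triangle p q w
  linarith

lemma pvD_zero_of_mem {ws : List (Int × Int)} (hws : ws ≠ []) {p : Int × Int} (hp : p ∈ ws) :
    pvD ws p = 0 := by
  have h1 := (pvD_spec ws p hws).2 p hp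
  rw [pvMd_self] at h1
  have h2 := pvD_nonneg hws p
  omega

lemma pvAdj_md {p u : Int × Int} (h : pvAdj p u) : pvMd p u = 1 := by
  obtain ⟨d, hd, rfl⟩ := h
  simp only [pvDirs, List.mem_cons, List.not_mem_nil, or_false] at hd
  rcases hd with rfl | rfl | rfl | rfl
  · unfold pvMd
    dsimp only
    rw [show p.1 - (p.1 + (1 : Int)) = -1 from by ring, show p.2 - (p.2 + (0 : Int)) = 0 from by ring]
    norm_num
  · unfold pvMd
    dsimp only
    rw [show p.1 - (p.1 + (-1 : Int)) = 1 from by ring, show p.2 - (p.2 + (0 : Int)) = 0 from by ring]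
    norm_num
  · unfold pvMd
    dsimp only
    rw [show p.1 - (p.1 + (0 : Int)) = 0 from by ring, show p.2 - (p.2 + (1 : Int)) = -1 from by ring]
    norm_num
  · unfold pvMd
    dsimp only
    rw [show p.1 - (p.1 + (0 : Int)) = 0 from by ring, show p.2 - (p.2 + (-1 : Int)) = 1 from by ring]
    norm_num

lemma pvAdj_symm {p u : Int × Int} (h : pvAdj p u) : pvAdj u p := by
  obtain ⟨d, hd, rfl⟩ := h
  simp only [pvDirs, List.mem_cons, List.not_mem_nil, or_false] at hd
  rcases hd with rfl | rfl | rfl | rfl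
  · exact ⟨(-1, 0), by simp [pvDirs], by simp only [Prod.ext_iff]; constructor <;> [skip; skip] <;> dsimp only <;> ring⟩
  · exact ⟨(1, 0), by simp [pvDirs], by simp only [Prod.ext_iff]; constructor <;> dsimp only <;> ring⟩
  · exact ⟨(0, -1), by simp [pvDirs], by simp only [Prod.ext_iff]; constructor <;> dsimp only <;> ring⟩
  · exact ⟨(0, 1), by simp [pvDirs], by simp only [Prod.ext_iff]; constructor <;> dsimp only <;> ring⟩

lemma pvAdj_toward {m n : Int} {ws : List (Int × Int)} (hws : ws ≠ [])
    (hg : ∀ w ∈ ws, pvInG m n w) {p : Int × Int} (hp : pvInG m n p) (h1 : 1 ≤ pvD ws p) :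
    ∃ u, pvInG m n u ∧ pvAdj p u ∧ pvD ws u = pvD ws p - 1 := by
  obtain ⟨⟨w, hw, heq⟩, _⟩ := pvD_spec ws p hws
  have hwg := hg w hw
  obtain ⟨hp1, hp2, hp3, hp4⟩ := hp
  obtain ⟨hw1, hw2, hw3, hw4⟩ := hwg
  have key : ∀ u, pvInG m n u → pvAdj p u → pvMd u w + 1 = pvMd p w →
      (∃ u', pvInG m n u' ∧ pvAdj p u' ∧ pvD ws u' = pvD ws p - 1) := by
    intro u hu hadj hstep
    refine ⟨u, hu, hadj, ?_⟩
    have h2 := (pvD_spec ws u hws).2 w hw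
    have h3 := pvD_lip hws p u
    have h4 := pvAdj_md hadj
    omega
  rcases lt_trichotomy p.1 w.1 with hc | hc | hc
  · refine key (p.1 + 1, p.2) (by rw [pvInG_mk]; omega)
      ⟨(1, 0), by simp [pvDirs], by simp [Prod.ext_iff]⟩ ?_
    unfold pvMd
    dsimp only
    rw [abs_of_nonpos (a := p.1 + 1 - w.1) (by omega), abs_of_nonpos (a := p.1 - w.1) (by omega)]
    ring
  · rcases lt_trichotomy p.2 w.2 with hc2 | hc2 | hc2
    · refine key (p.1, p.2 + 1) (by rw [pvInG_mk]; omega)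
        ⟨(0, 1), by simp [pvDirs], by simp [Prod.ext_iff]⟩ ?_
      unfold pvMd
      dsimp only
      rw [abs_of_nonpos (a := p.2 + 1 - w.2) (by omega), abs_of_nonpos (a := p.2 - w.2) (by omega)]
      ring
    · exfalso
      have he : p = w := Prod.ext hc hc2
      have hz : pvMd p w = 0 := by rw [he]; exact pvMd_self w
      omega
    · refine key (p.1, p.2 - 1) (by rw [pvInG_mk]; omega)
        ⟨(0, -1), by simp [pvDirs], by simp [Prod.ext_iff]; ring⟩ ?_
      unfold pvMd
      dsimp only
      rw [abs_of_nonneg (a := p.2 - 1 - w.2) (by omega), abs_of_nonneg (a := p.2 - w.2) (by omega)]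
      ring
  · refine key (p.1 - 1, p.2) (by rw [pvInG_mk]; omega)
      ⟨(-1, 0), by simp [pvDirs], by simp [Prod.ext_iff]; ring⟩ ?_
    unfold pvMd
    dsimp only
    rw [abs_of_nonneg (a := p.1 - 1 - w.1) (by omega), abs_of_nonneg (a := p.1 - w.1) (by omega)]
    ring

-- ---------- the relaxation fold ----------

lemma pvStepFold {m n : Int} {r c : Int} (hp : pvInG m n (r, c)) (dirs : List (Int × Int))
    (hdirs : ∀ d ∈ dirs, d ≠ ((0 : Int), (0 : Int))) :
    ∀ (h : List (List Int)) (acc : List (Int × Int)), pvDims h m n → 0 ≤ pvGet h r c →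
    pvDims (dirs.foldl (pvRelax m n r c) (h, acc)).1 m n ∧
    pvGet (dirs.foldl (pvRelax m n r c) (h, acc)).1 r c = pvGet h r c ∧
    (∀ u, pvInG m n u →
      ((∃ d ∈ dirs, u = (r + d.1, c + d.2)) ∧ pvGet h u.1 u.2 = -1 →
        pvGet (dirs.foldl (pvRelax m n r c) (h, acc)).1 u.1 u.2 = pvGet h r c + 1) ∧
      (¬ ((∃ d ∈ dirs, u = (r + d.1, c + d.2)) ∧ pvGet h u.1 u.2 = -1) →
        pvGet (dirs.foldl (pvRelax m n r c) (h, acc)).1 u.1 u.2 = pvGet h u.1 u.2)) ∧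
    (∃ news, (dirs.foldl (pvRelax m n r c) (h, acc)).2 = acc ++ news ∧
      (∀ u, u ∈ news ↔ pvInG m n u ∧ (∃ d ∈ dirs, u = (r + d.1, c + d.2)) ∧ pvGet h u.1 u.2 = -1) ∧
      pvCN (dirs.foldl (pvRelax m n r c) (h, acc)).1 + news.length = pvCN h) := by
  induction dirs with
  | nil =>
    intro h acc hd hval
    refine ⟨hd, rfl, ?_, [], by simp, by simp, by simp⟩
    intro u hu
    exact ⟨by rintro ⟨⟨d, hdm, _⟩, _⟩; exact absurd hdm (by simp), fun _ => rfl⟩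
  | cons d0 dirs ih =>
    intro h acc hd hval
    have hne := hdirs d0 (by simp)
    have hdirs' : ∀ d ∈ dirs, d ≠ ((0 : Int), (0 : Int)) := fun d hdm => hdirs d (by simp [hdm])
    rw [List.foldl_cons]
    by_cases hcond : 0 ≤ r + d0.1 ∧ r + d0.1 < m ∧ 0 ≤ c + d0.2 ∧ c + d0.2 < n ∧
        pvGet h (r + d0.1) (c + d0.2) = -1
    · have hrel : pvRelax m n r c (h, acc) d0 =
          (pvSet h (r + d0.1) (c + d0.2) (pvGet h r c + 1), acc ++ [(r + d0.1, c + d0.2)]) := by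
        unfold pvRelax
        dsimp only
        rw [if_pos hcond]
      rw [hrel]
      have hu0g : pvInG m n (r + d0.1, c + d0.2) := by
        rw [pvInG_mk]
        exact ⟨hcond.1, hcond.2.1, hcond.2.2.1, hcond.2.2.2.1⟩
      have hu0p : ((r + d0.1, c + d0.2) : Int × Int) ≠ (r, c) := by
        intro he
        apply hne
        have e1 : r + d0.1 = r := congrArg Prod.fst he
        have e2 : c + d0.2 = c := congrArg Prod.snd he
        exact Prod.ext (by omega) (by omega)
      have hval1 : pvGet (pvSet h (r + d0.1) (c + d0.2) (pvGet h r c + 1)) r c = pvGet h r c := by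
        have hpg := (pvInG_mk m n r c).mp hp
        exact pvGet_pvSet_ne hd _ hu0g hpg.1 hpg.2.2.1 (Ne.symm hu0p)
      have hset_self : pvGet (pvSet h (r + d0.1) (c + d0.2) (pvGet h r c + 1))
          (r + d0.1) (c + d0.2) = pvGet h r c + 1 := pvGet_pvSet_self hd _ hu0g
      have hget : ∀ u, pvInG m n u → u ≠ (r + d0.1, c + d0.2) →
          pvGet (pvSet h (r + d0.1) (c + d0.2) (pvGet h r c + 1)) u.1 u.2 = pvGet h u.1 u.2 := by
        intro u hu huu
        have hug : 0 ≤ u.1 ∧ u.1 < m ∧ 0 ≤ u.2 ∧ u.2 < n := hu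
        exact pvGet_pvSet_ne hd _ hu0g hug.1 hug.2.2.1 (by simpa using huu)
      obtain ⟨ihdims, ihrc, ihpw, news', ihsplit, ihmem, ihcn⟩ :=
        ih hdirs' (pvSet h (r + d0.1) (c + d0.2) (pvGet h r c + 1)) (acc ++ [(r + d0.1, c + d0.2)])
          (pvSet_dims hd _ _ _) (by rw [hval1]; exact hval)
      refine ⟨ihdims, ihrc.trans hval1, ?_, (r + d0.1, c + d0.2) :: news', ?_, ?_, ?_⟩
      · intro u hu
        constructor
        · rintro ⟨⟨d, hdm, hud⟩, hu1⟩
          by_cases huu : u = (r + d0.1, c + d0.2)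
          · have hne1 : pvGet (pvSet h (r + d0.1) (c + d0.2) (pvGet h r c + 1)) u.1 u.2 ≠ -1 := by
              rw [huu]
              dsimp only
              rw [hset_self]
              omega
            have := (ihpw u hu).2 (fun hx => hne1 hx.2)
            rw [this, huu]
            dsimp only
            rw [hset_self]
          · have hgu := hget u hu huu
            have hd' : d ∈ dirs := by
              rcases List.mem_cons.mp hdm with rfl | hh
              · exact absurd hud huu
              · exact hh
            have := (ihpw u hu).1 ⟨⟨d, hd', hud⟩, by rw [hgu]; exact hu1⟩
            rw [this, hval1]
        · intro hnc
          by_cases huu : u = (r + d0.1, c + d0.2)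
          · exfalso
            apply hnc
            refine ⟨⟨d0, by simp, huu⟩, ?_⟩
            rw [huu]
            exact hcond.2.2.2.2
          · have hgu := hget u hu huu
            have := (ihpw u hu).2 (by
              rintro ⟨⟨d, hdm, hud⟩, hx⟩
              exact hnc ⟨⟨d, by simp [hdm], hud⟩, by rw [← hgu]; exact hx⟩)
            rw [this, hgu]
      · rw [ihsplit, List.append_assoc]
        rfl
      · intro u
        rw [List.mem_cons, ihmem u]
        constructor
        · rintro (rfl | ⟨hug, ⟨d, hdm, hud⟩, hx⟩)
          · exact ⟨hu0g, ⟨d0, by simp, rfl⟩, hcond.2.2.2.2⟩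
          · have huu : u ≠ (r + d0.1, c + d0.2) := by
              intro he
              rw [he] at hx
              dsimp only at hx
              rw [hset_self] at hx
              omega
            exact ⟨hug, ⟨d, by simp [hdm], hud⟩, by rw [← hget u hug huu]; exact hx⟩
        · rintro ⟨hug, ⟨d, hdm, hud⟩, hx⟩
          by_cases huu : u = (r + d0.1, c + d0.2)
          · exact Or.inl huu
          · right
            have hd' : d ∈ dirs := by
              rcases List.mem_cons.mp hdm with rfl | hh
              · exact absurd hud huu
              · exact hh
            exact ⟨hug, ⟨d, hd', hud⟩, by rw [hget u hug huu]; exact hx⟩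
      · have hstep := pvCN_pvSet hd hu0g (v := pvGet h r c + 1) (by omega) hcond.2.2.2.2
        simp only [List.length_cons]
        omega
    · have hrel : pvRelax m n r c (h, acc) d0 = (h, acc) := by
        unfold pvRelax
        dsimp only
        rw [if_neg hcond]
      rw [hrel]
      obtain ⟨ihdims, ihrc, ihpw, news', ihsplit, ihmem, ihcn⟩ := ih hdirs' h acc hd hval
      refine ⟨ihdims, ihrc, ?_, news', ihsplit, ?_, ihcn⟩
      · intro u hu
        constructor
        · rintro ⟨⟨d, hdm, hud⟩, hu1⟩
          have hd' : d ∈ dirs := by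
            rcases List.mem_cons.mp hdm with rfl | hh
            · exfalso
              apply hcond
              have hug : 0 ≤ u.1 ∧ u.1 < m ∧ 0 ≤ u.2 ∧ u.2 < n := hu
              rw [hud] at hug hu1
              dsimp only at hug hu1
              exact ⟨hug.1, hug.2.1, hug.2.2.1, hug.2.2.2, hu1⟩
            · exact hh
          exact (ihpw u hu).1 ⟨⟨d, hd', hud⟩, hu1⟩
        · intro hnc
          exact (ihpw u hu).2 (by
            rintro ⟨⟨d, hdm, hud⟩, hx⟩
            exact hnc ⟨⟨d, by simp [hdm], hud⟩, hx⟩)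
      · intro u
        rw [ihmem u]
        constructor
        · rintro ⟨hug, ⟨d, hdm, hud⟩, hx⟩
          exact ⟨hug, ⟨d, by simp [hdm], hud⟩, hx⟩
        · rintro ⟨hug, ⟨d, hdm, hud⟩, hx⟩
          refine ⟨hug, ⟨d, ?_, hud⟩, hx⟩
          rcases List.mem_cons.mp hdm with rfl | hh
          · exfalso
            apply hcond
            have hug' : 0 ≤ u.1 ∧ u.1 < m ∧ 0 ≤ u.2 ∧ u.2 < n := hug
            rw [hud] at hug' hx
            dsimp only at hug' hx
            exact ⟨hug'.1, hug'.2.1, hug'.2.2.1, hug'.2.2.2, hx⟩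
          · exact hh

-- ---------- the BFS invariant ----------

structure pvInv (m n : Int) (ws : List (Int × Int)) (h : List (List Int))
    (q : List (Int × Int)) (d : Int) : Prop where
  dnn : 0 ≤ d
  dims : pvDims h m n
  vals : ∀ u, pvInG m n u → pvGet h u.1 u.2 = -1 ∨ pvGet h u.1 u.2 = pvD ws u
  comp : ∀ u, pvInG m n u → pvD ws u ≤ d → pvGet h u.1 u.2 ≠ -1
  qsplit : ∃ q1 q2, q = q1 ++ q2 ∧ (∀ p ∈ q1, pvInG m n p ∧ pvD ws p = d) ∧
      (∀ p ∈ q2, pvInG m n p ∧ pvD ws p = d + 1)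
  qdisc : ∀ p ∈ q, pvGet h p.1 p.2 ≠ -1
  closed : ∀ p, pvInG m n p → pvGet h p.1 p.2 ≠ -1 → p ∉ q →
      ∀ u, pvInG m n u → pvAdj p u → pvGet h u.1 u.2 ≠ -1

lemma pvInv_terminal {m n d : Int} {ws : List (Int × Int)} {h : List (List Int)}
    (hws : ws ≠ []) (hg : ∀ w ∈ ws, pvInG m n w) (inv : pvInv m n ws h [] d) :
    ∀ u, pvInG m n u → pvGet h u.1 u.2 = pvD ws u := by
  have main : ∀ k : ℕ, ∀ u, pvInG m n u → pvD ws u ≤ (k : Int) → pvGet h u.1 u.2 ≠ -1 := by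
    intro k
    induction k with
    | zero =>
      intro u hu hk
      exact inv.comp u hu (le_trans hk inv.dnn)
    | succ k ih =>
      intro u hu hk
      by_cases hsmall : pvD ws u ≤ (k : Int)
      · exact ih u hu hsmall
      · have h1 : 1 ≤ pvD ws u := by
          have := pvD_nonneg hws u
          omega
        obtain ⟨v, hvg, hadj, hvd⟩ := pvAdj_toward hws hg hu h1
        have hv : pvGet h v.1 v.2 ≠ -1 := by
          apply ih v hvg
          push_cast at hk ⊢
          omega
        exact inv.closed v hvg hv (by simp) u hu (pvAdj_symm hadj)
  intro u hu
  rcases inv.vals u hu with hneg | hval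
  · exfalso
    refine main (pvD ws u).toNat u hu ?_ hneg
    have := pvD_nonneg hws u
    omega
  · exact hval

lemma pvInv_reindex {m n d : Int} {ws : List (Int × Int)} {h : List (List Int)}
    {q : List (Int × Int)} (hws : ws ≠ []) (hg : ∀ w ∈ ws, pvInG m n w)
    (inv : pvInv m n ws h q d) (hq : ∀ p ∈ q, pvInG m n p ∧ pvD ws p = d + 1) :
    pvInv m n ws h q (d + 1) := by
  refine ⟨by have := inv.dnn; omega, inv.dims, inv.vals, ?_, ⟨q, [], by simp, hq, by simp⟩,
    inv.qdisc, inv.closed⟩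
  intro u hu hle
  by_cases hsm : pvD ws u ≤ d
  · exact inv.comp u hu hsm
  · have h1 : 1 ≤ pvD ws u := by have := inv.dnn; omega
    obtain ⟨v, hvg, hadj, hvd⟩ := pvAdj_toward hws hg hu h1
    have hv : pvGet h v.1 v.2 ≠ -1 := inv.comp v hvg (by omega)
    have hvq : v ∉ q := by
      intro hin
      have := (hq v hin).2
      omega
    exact inv.closed v hvg hv hvq u hu (pvAdj_symm hadj)

lemma pvInv_step {m n d r c : Int} {ws : List (Int × Int)} {h : List (List Int)}
    {rest : List (Int × Int)} (hws : ws ≠ []) (hg : ∀ w ∈ ws, pvInG m n w)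
    (inv : pvInv m n ws h ((r, c) :: rest) d) (hdrc : pvD ws (r, c) = d) :
    pvInv m n ws (pvStep m n h r c).1 (rest ++ (pvStep m n h r c).2) d ∧
    pvCN (pvStep m n h r c).1 + (pvStep m n h r c).2.length = pvCN h := by
  have hpq : ((r, c) : Int × Int) ∈ (r, c) :: rest := by simp
  obtain ⟨q1, q2, hq, hq1, hq2⟩ := inv.qsplit
  have hpin : pvInG m n (r, c) := by
    have hx : ((r, c) : Int × Int) ∈ q1 ++ q2 := by rw [← hq]; exact hpq
    rcases List.mem_append.mp hx with hm1 | hm2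
    · exact (hq1 _ hm1).1
    · exact (hq2 _ hm2).1
  have hdisc := inv.qdisc _ hpq
  have hval : pvGet h r c = pvD ws (r, c) := by
    rcases inv.vals _ hpin with hx | hx
    · exact absurd hx hdisc
    · exact hx
  have hval0 : 0 ≤ pvGet h r c := by rw [hval]; exact pvD_nonneg hws _
  have hdirs : ∀ d' ∈ pvDirs, d' ≠ ((0 : Int), (0 : Int)) := by decide
  obtain ⟨sdims, src, spw, news, ssplit, smem, scn⟩ :=
    pvStepFold hpin pvDirs hdirs h [] inv.dims hval0
  have hstep_eq : pvDirs.foldl (pvRelax m n r c) (h, []) = pvStep m n h r c := rfl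
  rw [hstep_eq] at sdims src spw ssplit scn
  rw [List.nil_append] at ssplit
  -- facts about newly discovered cells
  have hnewD : ∀ u ∈ news, pvInG m n u ∧ pvD ws u = d + 1 ∧
      pvGet (pvStep m n h r c).1 u.1 u.2 = d + 1 := by
    intro u hu
    obtain ⟨hug, hadj, hneg⟩ := (smem u).mp hu
    have hDlb : ¬ pvD ws u ≤ d := fun hle => inv.comp u hug hle hneg
    have hadj' : pvAdj (r, c) u := hadj
    have hDub : pvD ws u ≤ d + 1 := by
      have hlip := pvD_lip hws u (r, c)
      have hmd := pvAdj_md hadj'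
      rw [pvMd_comm] at hmd
      omega
    have hDeq : pvD ws u = d + 1 := by omega
    refine ⟨hug, hDeq, ?_⟩
    have hx := (spw u hug).1 ⟨hadj, hneg⟩
    rw [hx, hval, hdrc]
  have hmono : ∀ u, pvInG m n u → pvGet h u.1 u.2 ≠ -1 →
      pvGet (pvStep m n h r c).1 u.1 u.2 = pvGet h u.1 u.2 := by
    intro u hu hx
    exact (spw u hu).2 (fun hy => hx hy.2)
  constructor
  · -- the invariant
    refine ⟨inv.dnn, sdims, ?_, ?_, ?_, ?_, ?_⟩
    · -- vals
      intro u hu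
      by_cases hc' : pvAdj (r, c) u ∧ pvGet h u.1 u.2 = -1
      · have humem : u ∈ news := (smem u).mpr ⟨hu, hc'.1, hc'.2⟩
        obtain ⟨_, hDeq, hVeq⟩ := hnewD u humem
        right
        rw [hVeq, hDeq]
      · have hx := (spw u hu).2 hc'
        rw [hx]
        exact inv.vals u hu
    · -- comp
      intro u hu hle
      have hx := inv.comp u hu hle
      rw [hmono u hu hx]
      exact hx
    · -- qsplit
      cases q1 with
      | nil =>
        -- then (r, c) ∈ q2, so pvD (r, c) = d + 1, contradicting hdrc
        exfalso
        have hx : ((r, c) : Int × Int) ∈ q2 := by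
          have hy := hpq
          rw [hq, List.nil_append] at hy
          exact hy
        have := (hq2 _ hx).2
        omega
      | cons p0 t =>
        have he : (r, c) = p0 ∧ rest = t ++ q2 := by
          simp only [List.cons_append, List.cons.injEq] at hq
          exact hq
        obtain ⟨he1, he2⟩ := he
        refine ⟨t, q2 ++ news, by rw [he2, ssplit, List.append_assoc], ?_, ?_⟩
        · intro p hp
          exact hq1 p (List.mem_cons_of_mem _ hp)
        · intro p hp
          rcases List.mem_append.mp hp with hpa | hpb
          · exact hq2 p hpa
          · obtain ⟨hpg, hDeq, _⟩ := hnewD p hpb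
            exact ⟨hpg, hDeq⟩
    · -- qdisc
      intro p hp
      rcases List.mem_append.mp hp with hpa | hpb
      · have hpg : pvInG m n p := by
          have hpq' : p ∈ q1 ++ q2 := by
            rw [← hq]
            exact List.mem_cons_of_mem _ hpa
          rcases List.mem_append.mp hpq' with hm1 | hm2
          · exact (hq1 _ hm1).1
          · exact (hq2 _ hm2).1
        have hx := inv.qdisc p (List.mem_cons_of_mem _ hpa)
        rw [hmono p hpg hx]
        exact hx
      · rw [ssplit] at hpb
        obtain ⟨_, _, hVeq⟩ := hnewD p hpb
        rw [hVeq]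
        have := inv.dnn
        omega
    · -- closed
      intro x hx hgx hxq u hu hadj
      by_cases hxp : x = (r, c)
      · subst hxp
        by_cases hu1 : pvGet h u.1 u.2 = -1
        · have hmem' : u ∈ news := (smem u).mpr ⟨hu, hadj, hu1⟩
          obtain ⟨_, _, hVeq⟩ := hnewD u hmem'
          rw [hVeq]
          have := inv.dnn
          omega
        · rw [hmono u hu hu1]
          exact hu1
      · by_cases hhx : pvGet h x.1 x.2 = -1
        · exfalso
          have hchg : pvAdj (r, c) x ∧ pvGet h x.1 x.2 = -1 := by
            by_contra hcon
            have hy := (spw x hx).2 hcon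
            rw [hy] at hgx
            exact hgx hhx
          have hxm : x ∈ news := (smem x).mpr ⟨hx, hchg.1, hchg.2⟩
          rw [← ssplit] at hxm
          exact hxq (List.mem_append_right _ hxm)
        · have hxq' : x ∉ (r, c) :: rest := by
            intro hmem
            rcases List.mem_cons.mp hmem with hmem' | hmem'
            · exact hxp hmem'
            · exact hxq (List.mem_append_left _ hmem')
          have hx' := inv.closed x hx hhx hxq' u hu hadj
          rw [hmono u hu hx']
          exact hx'
  · rw [ssplit]
    exact scn

lemma pvBfs_nil (m n : Int) (fuel : ℕ) (h : List (List Int)) : pvBfs m n fuel h [] = h := by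
  cases fuel <;> simp [pvBfs]

lemma pvBfs_run {m n : Int} {ws : List (Int × Int)} (hws : ws ≠ [])
    (hg : ∀ w ∈ ws, pvInG m n w) :
    ∀ (fuel : ℕ) (h : List (List Int)) (q : List (Int × Int)) (d : Int),
      pvInv m n ws h q d → pvCN h + q.length ≤ fuel →
      pvDims (pvBfs m n fuel h q) m n ∧
      ∀ u, pvInG m n u → pvGet (pvBfs m n fuel h q) u.1 u.2 = pvD ws u := by
  intro fuel
  induction fuel with
  | zero =>
    intro h q d inv hm
    have hq : q = [] := List.length_eq_zero_iff.mp (by omega)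
    subst hq
    rw [pvBfs_nil]
    exact ⟨inv.dims, pvInv_terminal hws hg inv⟩
  | succ fuel ih =>
    intro h q d inv hm
    match q with
    | [] =>
      rw [pvBfs_nil]
      exact ⟨inv.dims, pvInv_terminal hws hg inv⟩
    | (r, c) :: rest =>
      have hstep : pvBfs m n (fuel + 1) h ((r, c) :: rest) =
          pvBfs m n fuel (pvStep m n h r c).1 (rest ++ (pvStep m n h r c).2) := by
        simp [pvBfs]
      rw [hstep]
      simp only [List.length_cons] at hm
      by_cases hd : pvD ws (r, c) = d
      · obtain ⟨inv', hcn⟩ := pvInv_step hws hg inv hd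
        refine ih _ _ d inv' ?_
        simp only [List.length_append]
        omega
      · have hall : ∀ p ∈ (r, c) :: rest, pvInG m n p ∧ pvD ws p = d + 1 := by
          obtain ⟨q1, q2, hq, hq1, hq2⟩ := inv.qsplit
          cases q1 with
          | nil =>
            intro p hp
            apply hq2
            rw [← List.nil_append q2, ← hq]
            exact hp
          | cons p0 t =>
            exfalso
            apply hd
            have e1 : p0 = (r, c) := by
              simp only [List.cons_append, List.cons.injEq] at hq
              exact hq.1.symm
            rw [← e1] at *
            exact (hq1 p0 (by simp)).2
        have inv' := pvInv_reindex hws hg inv hall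
        have hd' : pvD ws (r, c) = d + 1 := (hall _ (by simp)).2
        obtain ⟨inv'', hcn⟩ := pvInv_step hws hg inv' hd'
        refine ih _ _ (d + 1) inv'' ?_
        simp only [List.length_append]
        omega

-- ---------- initialization ----------

lemma pvInit_row (W : List (List Int)) (m n : Int) (r : Int) (hr : 0 ≤ r ∧ r < m) :
    ∀ (cs : List Int), (∀ c ∈ cs, 0 ≤ c ∧ c < n) →
    ∀ (st : List (Int × Int) × List (List Int)), pvDims st.2 m n →
      (cs.foldl (fun (st : List (Int × Int) × List (List Int)) c =>
        if pvGet W r c = 1 then (st.1 ++ [(r, c)], pvSet st.2 r c 0) else st) st).1 =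
        st.1 ++ (cs.filter (fun c => pvGet W r c == 1)).map (fun c => (r, c)) ∧
      pvDims (cs.foldl (fun (st : List (Int × Int) × List (List Int)) c =>
        if pvGet W r c = 1 then (st.1 ++ [(r, c)], pvSet st.2 r c 0) else st) st).2 m n ∧
      ∀ u, pvInG m n u →
        pvGet (cs.foldl (fun (st : List (Int × Int) × List (List Int)) c =>
          if pvGet W r c = 1 then (st.1 ++ [(r, c)], pvSet st.2 r c 0) else st) st).2 u.1 u.2 =
        if u.1 = r ∧ u.2 ∈ cs ∧ pvGet W r u.2 = 1 then 0 else pvGet st.2 u.1 u.2 := by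
  intro cs
  induction cs with
  | nil =>
    intro _ st hst
    refine ⟨by simp, hst, ?_⟩
    intro u hu
    simp
  | cons c0 cs ihc =>
    intro hcs st hst
    have hc0 := hcs c0 (by simp)
    rw [List.foldl_cons]
    by_cases hw : pvGet W r c0 = 1
    · rw [if_pos hw]
      have hin0 : pvInG m n (r, c0) := by
        unfold pvInG; dsimp only; omega
      obtain ⟨ih1, ih2, ih3⟩ := ihc (fun c hc => hcs c (by simp [hc]))
        (st.1 ++ [(r, c0)], pvSet st.2 r c0 0) (pvSet_dims hst _ _ _)
      refine ⟨?_, ih2, ?_⟩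
      · rw [ih1]
        simp only [List.filter_cons, hw]
        simp [List.append_assoc]
      · intro u hu
        rw [ih3 u hu]
        by_cases hcase : u.1 = r ∧ u.2 ∈ cs ∧ pvGet W r u.2 = 1
        · rw [if_pos hcase, if_pos ⟨hcase.1, by simp [hcase.2.1], hcase.2.2⟩]
        · rw [if_neg hcase]
          by_cases huu : u = (r, c0)
          · rw [if_pos (by rw [huu]; exact ⟨rfl, by simp, hw⟩)]
            rw [huu]
            exact pvGet_pvSet_self hst _ hin0
          · rw [if_neg (by
              rintro ⟨he1, he2, he3⟩
              rcases List.mem_cons.mp he2 with he | he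
              · exact huu (Prod.ext he1 he)
              · exact hcase ⟨he1, he, he3⟩)]
            have hug := hu
            unfold pvInG at hug
            exact pvGet_pvSet_ne hst _ hin0 hug.1 hug.2.2.1 (by simpa using huu)
    · rw [if_neg hw]
      obtain ⟨ih1, ih2, ih3⟩ := ihc (fun c hc => hcs c (by simp [hc])) st hst
      refine ⟨?_, ih2, ?_⟩
      · rw [ih1]
        simp only [List.filter_cons]
        rw [if_neg (by simpa using hw)]
      · intro u hu
        rw [ih3 u hu]
        by_cases hcase : u.1 = r ∧ u.2 ∈ cs ∧ pvGet W r u.2 = 1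
        · rw [if_pos hcase, if_pos ⟨hcase.1, by simp [hcase.2.1], hcase.2.2⟩]
        · rw [if_neg hcase, if_neg (by
            rintro ⟨he1, he2, he3⟩
            rcases List.mem_cons.mp he2 with he | he
            · rw [he] at he3
              exact hw he3
            · exact hcase ⟨he1, he, he3⟩)]

lemma pvInit_rows (W : List (List Int)) (m n : Int) :
    ∀ (rs : List Int), (∀ r ∈ rs, 0 ≤ r ∧ r < m) →
    ∀ (st : List (Int × Int) × List (List Int)), pvDims st.2 m n →
      (rs.foldl (fun st r =>
        (PySem.List.pyRange 0 n 1).foldl (fun (st : List (Int × Int) × List (List Int)) c =>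
          if pvGet W r c = 1 then (st.1 ++ [(r, c)], pvSet st.2 r c 0) else st) st) st).1 =
        st.1 ++ rs.flatMap (fun r =>
          ((PySem.List.pyRange 0 n 1).filter (fun c => pvGet W r c == 1)).map (fun c => (r, c))) ∧
      pvDims (rs.foldl (fun st r =>
        (PySem.List.pyRange 0 n 1).foldl (fun (st : List (Int × Int) × List (List Int)) c =>
          if pvGet W r c = 1 then (st.1 ++ [(r, c)], pvSet st.2 r c 0) else st) st) st).2 m n ∧
      ∀ u, pvInG m n u →
        pvGet (rs.foldl (fun st r =>
          (PySem.List.pyRange 0 n 1).foldl (fun (st : List (Int × Int) × List (List Int)) c =>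
            if pvGet W r c = 1 then (st.1 ++ [(r, c)], pvSet st.2 r c 0) else st) st) st).2 u.1 u.2 =
        if u.1 ∈ rs ∧ pvGet W u.1 u.2 = 1 then 0 else pvGet st.2 u.1 u.2 := by
  intro rs
  induction rs with
  | nil =>
    intro _ st hst
    refine ⟨by simp, hst, ?_⟩
    intro u hu
    simp
  | cons r0 rs ihr =>
    intro hrs st hst
    have hr0 := hrs r0 (by simp)
    rw [List.foldl_cons]
    obtain ⟨row1, row2, row3⟩ := pvInit_row W m n r0 hr0 (PySem.List.pyRange 0 n 1)
      (fun c hc => by rw [PySem.List.mem_pyRange_one] at hc; omega) st hst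
    obtain ⟨ih1, ih2, ih3⟩ := ihr (fun r hr => hrs r (by simp [hr])) _ row2
    refine ⟨?_, ih2, ?_⟩
    · rw [ih1, row1]
      simp [List.append_assoc]
    · intro u hu
      rw [ih3 u hu, row3 u hu]
      have hu2 : u.2 ∈ PySem.List.pyRange 0 n 1 := by
        rw [PySem.List.mem_pyRange_one]
        have := hu
        unfold pvInG at this
        omega
      by_cases hcase : u.1 ∈ rs ∧ pvGet W u.1 u.2 = 1
      · rw [if_pos hcase, if_pos ⟨by simp [hcase.1], hcase.2⟩]
      · rw [if_neg hcase]
        by_cases huu : u.1 = r0 ∧ pvGet W u.1 u.2 = 1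
        · rw [if_pos (by
            refine ⟨huu.1, hu2, ?_⟩
            rw [← huu.1]
            exact huu.2), if_pos ⟨by simp [huu.1], huu.2⟩]
        · rw [if_neg (by
            rintro ⟨he1, _, he3⟩
            rw [← he1] at he3
            exact huu ⟨he1, he3⟩),
            if_neg (by
            rintro ⟨he1, he2⟩
            rcases List.mem_cons.mp he1 with he | he
            · exact huu ⟨he, he2⟩
            · exact hcase ⟨he, he2⟩)]

-- ---------- final assembly ----------

lemma pvGrid_eq_of_pointwise {G : List (List Int)} {m n : Int} (hn : 0 ≤ n) (hd : pvDims G m n)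
    (f : Int → Int → Int)
    (hpt : ∀ u, pvInG m n u → pvGet G u.1 u.2 = f u.1 u.2) :
    G = (PySem.List.pyRange 0 m 1).map (fun r => (PySem.List.pyRange 0 n 1).map (fun c => f r c)) := by
  have hm : 0 ≤ m := by have := hd.1; omega
  apply List.ext_getElem
  · simp only [List.length_map, PySem.List.length_pyRange_one]
    have := hd.1
    omega
  · intro i h1 h2
    rw [List.getElem_map]
    have him : (i : Int) < m := by
      have := hd.1
      push_cast
      omega
    have hrowlen := hd.2 _ (List.getElem_mem h1)
    apply List.ext_getElem
    · simp only [List.length_map, PySem.List.length_pyRange_one]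
      omega
    · intro j hj1 hj2
      rw [List.getElem_map]
      have hjn : (j : Int) < n := by
        push_cast
        omega
      have hpt' := hpt ((i : Int), (j : Int))
        ⟨Int.natCast_nonneg i, him, Int.natCast_nonneg j, hjn⟩
      dsimp only at hpt'
      rw [pvGet_elem G i j h1 (by omega)] at hpt'
      rw [hpt']
      simp [PySem.List.getElem_pyRange_one]

lemma pvRange_map_const (n : Int) (hn : 0 ≤ n) (x : Int) :
    (PySem.List.pyRange 0 n 1).map (fun _ => x) = List.replicate n.toNat x := by
  rw [List.map_const', PySem.List.length_pyRange_one]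
  congr 1
  omega

-- ===== VERDICT (by name: the statement is the Claim_ definition above) =====
theorem highestPeak_spec : Claim_equal_highestPeak := by
  unfold Claim_equal_highestPeak Spec_highestPeak
  intro W _ _
  simp only [highestPeak, highestPeak_alt]
  set m : Int := (W.length : Int) with hmdef
  set n : Int := ((W.headI).length : Int) with hndef
  have hm : 0 ≤ m := by rw [hmdef]; positivity
  have hn : 0 ≤ n := by rw [hndef]; positivity
  obtain ⟨init1, init2, init3⟩ := pvInit_rows W m n (PySem.List.pyRange 0 m 1)
    (fun r hr => by rw [PySem.List.mem_pyRange_one] at hr; omega)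
    ([], List.replicate m.toNat (List.replicate n.toNat (-1 : Int)))
    (pvDims_height0 m n hm hn)
  rw [List.nil_append, ← pvWs] at init1
  by_cases hws : pvWs W m n = []
  · -- no water: A returns the untouched all -1 grid, B takes the empty branch
    rw [if_pos (by rw [← pvWs]; exact hws)]
    rw [init1, hws, pvBfs_nil]
    have hpt : ∀ u, pvInG m n u →
        pvGet ((PySem.List.pyRange 0 m 1).foldl (fun st r =>
          (PySem.List.pyRange 0 n 1).foldl (fun (st : List (Int × Int) × List (List Int)) c =>
            if pvGet W r c = 1 then (st.1 ++ [(r, c)], pvSet st.2 r c 0) else st) st)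
          ([], List.replicate m.toNat (List.replicate n.toNat (-1 : Int)))).2 u.1 u.2 =
        (fun _ _ => (-1 : Int)) u.1 u.2 := by
      intro u hu
      rw [init3 u hu]
      rw [if_neg (by
        rintro ⟨_, hw1⟩
        have : u ∈ pvWs W m n := (pvWs_mem W m n u).mpr ⟨hu, hw1⟩
        rw [hws] at this
        exact absurd this (by simp))]
      exact pvGet_height0 m n u hu
    rw [pvGrid_eq_of_pointwise hn init2 (fun _ _ => (-1 : Int)) hpt]
    exact List.map_congr_left (fun r _ => pvRange_map_const n hn ((-1 : Int)))
  · rw [if_neg (by rw [← pvWs]; exact hws)]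
    have hg : ∀ w ∈ pvWs W m n, pvInG m n w :=
      fun w hw => ((pvWs_mem W m n w).mp hw).1
    -- the initial invariant, at layer 0
    have hpt0 : ∀ u, pvInG m n u →
        pvGet ((PySem.List.pyRange 0 m 1).foldl (fun st r =>
          (PySem.List.pyRange 0 n 1).foldl (fun (st : List (Int × Int) × List (List Int)) c =>
            if pvGet W r c = 1 then (st.1 ++ [(r, c)], pvSet st.2 r c 0) else st) st)
          ([], List.replicate m.toNat (List.replicate n.toNat (-1 : Int)))).2 u.1 u.2 =
        if u ∈ pvWs W m n then 0 else -1 := by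
      intro u hu
      rw [init3 u hu]
      by_cases hcase : u ∈ pvWs W m n
      · obtain ⟨_, hw1⟩ := (pvWs_mem W m n u).mp hcase
        rw [if_pos hcase, if_pos ⟨by
          rw [PySem.List.mem_pyRange_one]
          have hug : 0 ≤ u.1 ∧ u.1 < m ∧ 0 ≤ u.2 ∧ u.2 < n := hu
          omega, hw1⟩]
      · rw [if_neg hcase, if_neg (by
          rintro ⟨_, hw1⟩
          exact hcase ((pvWs_mem W m n u).mpr ⟨hu, hw1⟩)), pvGet_height0 m n u hu]
    have inv0 : pvInv m n (pvWs W m n)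
        ((PySem.List.pyRange 0 m 1).foldl (fun st r =>
          (PySem.List.pyRange 0 n 1).foldl (fun (st : List (Int × Int) × List (List Int)) c =>
            if pvGet W r c = 1 then (st.1 ++ [(r, c)], pvSet st.2 r c 0) else st) st)
          ([], List.replicate m.toNat (List.replicate n.toNat (-1 : Int)))).2
        (pvWs W m n) 0 := by
      refine ⟨le_refl 0, init2, ?_, ?_, ⟨pvWs W m n, [], by simp,
        fun p hp => ⟨hg p hp, pvD_zero_of_mem hws hp⟩, by simp⟩, ?_, ?_⟩
      · intro u hu
        rw [hpt0 u hu]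
        by_cases hcase : u ∈ pvWs W m n
        · rw [if_pos hcase]
          right
          rw [pvD_zero_of_mem hws hcase]
        · rw [if_neg hcase]
          left
          rfl
      · intro u hu hle
        have h0 : pvD (pvWs W m n) u = 0 := le_antisymm hle (pvD_nonneg hws u)
        obtain ⟨⟨w, hw, he⟩, _⟩ := pvD_spec (pvWs W m n) u hws
        rw [h0] at he
        have huw : u = w := pvMd_eq_zero he.symm
        rw [hpt0 u hu, if_pos (huw ▸ hw)]
        omega
      · intro p hp
        rw [hpt0 p (hg p hp), if_pos hp]
        omega
      · intro p hp hpg hpq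
        exfalso
        apply hpq
        rw [hpt0 p hp] at hpg
        by_cases hcase : p ∈ pvWs W m n
        · exact hcase
        · rw [if_neg hcase] at hpg
          exact absurd rfl hpg
    rw [init1]
    obtain ⟨hdims, hpt⟩ := pvBfs_run hws hg
      (m.toNat * n.toNat + (pvWs W m n).length) _ (pvWs W m n) 0 inv0
      (by
        have := pvCN_le init2
        omega)
    rw [pvGrid_eq_of_pointwise hn hdims (fun a b => pvD (pvWs W m n) (a, b))
      (fun u hu => by rw [hpt u hu])]
    rw [← pvWs]
    simp only [pvD, pvMd]
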